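-- pv_equiv track=rewrite | github.com/myredme14/MyPythonProjects | MiniGamesFLAMES.py | findflames
-- ===== SOURCE A (Python) =====
-- def findflames(s,n):
--     while len(s)>1:
--         j=-1
--         for i in range(n):
--             j=j+1
--             if j>len(s)-1:
--                 j=0
--
--         m=s[:j]
--         s.pop(j)
--         m=s[j:]+m
--         s=m
--
--     return s
-- ===== SOURCE B (Python) =====
-- def findflames(s, n):
--     # Same survivor, but each round removes via a single modulo step
--     # (Josephus-style) instead of counting n steps one by one.
--     # Note: unlike the original, this does not mutate the caller's list.
--     while len(s) > 1:
--         j = (n - 1) % len(s)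
--         s = s[j + 1:] + s[:j]
--     return s
-- ===== Notes on version B (the rewrite author's own statement) =====
-- stated objective: faster
-- what changed: The n-step counting loop per elimination round is replaced by a single modulo computation j=(n-1)%len(s), turning O(n) work per round into O(1) index arithmetic; Pre_ excludes n <= 0 with len(s) > 1, where A never returns: j stays -1, s.pop(-1) removes the last element but m = s[-1:] + s[:-1] immediately re-prepends one element, so len(s) is invariant and the while loop runs forever (verified: python3 times out), while B returns the Josephus survivor there.
-- outside the precondition, e.g. on findflames(['a', 'b', 'c'], 0): A does not finish within the time limit, B returns ['a']; on findflames(['a', 'b', 'c'], -2): A does not finish within the time limit, B returns ['b']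
import Mathlib
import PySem

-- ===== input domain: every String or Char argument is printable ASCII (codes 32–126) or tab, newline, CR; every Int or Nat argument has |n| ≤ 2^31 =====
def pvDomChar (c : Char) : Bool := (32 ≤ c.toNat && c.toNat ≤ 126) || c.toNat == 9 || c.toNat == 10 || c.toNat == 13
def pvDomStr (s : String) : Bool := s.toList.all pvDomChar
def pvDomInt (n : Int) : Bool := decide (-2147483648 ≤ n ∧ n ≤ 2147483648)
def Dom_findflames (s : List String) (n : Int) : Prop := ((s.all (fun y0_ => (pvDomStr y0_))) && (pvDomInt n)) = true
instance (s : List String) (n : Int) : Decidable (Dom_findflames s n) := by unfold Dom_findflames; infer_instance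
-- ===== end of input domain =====

-- B replaces A's n-step counting loop per round by one modulo step j=(n-1)%len(s) (faster);
-- A mutates the caller's list (pop), B does not — the claim is about the return value only.

-- ===== PORT A =====
-- fuel = initial length bounds the number of rounds (each round removes one element inside Pre_);
-- it only makes the Lean function total where the Python never returns (n ≤ 0), outside Pre_.
def findflamesLoop (fuel : Nat) (s : List String) (n : Int) : List String :=
  match fuel with
  | 0 => s
  | Nat.succ fuel =>
    if s.length > 1 then
      let j : Int := (PySem.List.pyRange 0 n).foldl
        (fun j _ => if j + 1 > (s.length : Int) - 1 then 0 else j + 1) (-1)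
      let m := PySem.List.slice s none (some j)
      match PySem.List.pop? s j with
      | none => []  -- IndexError: unreachable (j is always a valid index here)
      | some (_, s') => findflamesLoop fuel (PySem.List.slice s' (some j) none ++ m) n
    else s

def findflames (s : List String) (n : Int) : List String :=
  findflamesLoop s.length s n

-- ===== PORT B =====
-- termination helper for the port of B (cited by decreasing_by)
theorem findflames_alt_step_len (s : List String) (j : Int) (h0 : 0 ≤ j)
    (h1 : j < (s.length : Int)) (hl : 1 < s.length) :
    (PySem.List.slice s (some (j + 1)) none ++ PySem.List.slice s none (some j)).length
      < s.length := by
  rw [PySem.List.slice_from s (by omega), PySem.List.slice_to s h0]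
  simp only [List.length_append, List.length_drop, List.length_take]
  omega

def findflames_alt (s : List String) (n : Int) : List String :=
  if h : s.length > 1 then
    let j : Int := PySem.Int.mod (n - 1) (s.length : Int)
    findflames_alt (PySem.List.slice s (some (j + 1)) none ++ PySem.List.slice s none (some j)) n
  else s
termination_by s.length
decreasing_by
  exact findflames_alt_step_len s _ (PySem.Int.mod_nonneg _ (by omega)) (PySem.Int.mod_lt _ (by omega)) h

-- ===== PRECONDITION & SPEC =====
-- Pre_ excludes exactly the inputs on which A never returns: for n ≤ 0 with len(s) > 1 the
-- for-loop is empty so j stays -1; s.pop(-1) does shrink s by one, but the very next line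
-- m = s[-1:] + m re-prepends an element to the L-1 kept in m, so each round ends with
-- len(s) = 1 + (L-1) = L again (e.g. ['a','b','c'] becomes ['b','a','b']) and the while
-- loop runs forever — A returns no value there, while B returns a survivor.
def Pre_findflames (s : List String) (n : Int) : Prop := 1 ≤ n ∨ s.length ≤ 1
instance (s : List String) (n : Int) : Decidable (Pre_findflames s n) := by
  unfold Pre_findflames; infer_instance

def pvWitness_findflames : List String × Int := (["f", "l", "a", "m", "e", "s"], 3)

def Spec_findflames (s : List String) (n : Int) (out : List String) : Prop := out = findflames_alt s n
instance (s : List String) (n : Int) (out : List String) : Decidable (Spec_findflames s n out) := by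
  unfold Spec_findflames; infer_instance

-- ===== CLAIM (what is proved, stated in full; the proofs are below) =====
def Claim_equal_findflames : Prop := ∀ (s : List String) (n : Int),
  Dom_findflames s n → Pre_findflames s n → Spec_findflames s n (findflames s n)

-- ===== LEMMAS AND PROOFS =====

-- a fold whose body ignores the list elements is an iterate
theorem pv_foldl_ignore_iterate {α : Type} (g : Int → Int) :
    ∀ (l : List α) (init : Int), l.foldl (fun j _ => g j) init = g^[l.length] init := by
  intro l
  induction l with
  | nil => intro init; rfl
  | cons a t ih =>
      intro init
      simp only [List.foldl_cons, List.length_cons, ih, Function.iterate_succ_apply]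

-- k+1 counting steps from -1 land on k % L
theorem pv_iterate_step (L : Nat) (hL : 2 ≤ L) :
    ∀ k : Nat, (fun j : Int => if j + 1 > (L : Int) - 1 then 0 else j + 1)^[k + 1] (-1)
      = ((k : Int)) % (L : Int) := by
  intro k
  induction k with
  | zero =>
      simp only [zero_add, Function.iterate_one, Nat.cast_zero]
      rw [if_neg (by omega)]
      rw [Int.zero_emod]
      omega
  | succ k ih =>
      rw [Function.iterate_succ_apply', ih]
      have hr0 : 0 ≤ (k : Int) % (L : Int) := Int.emod_nonneg _ (by omega)
      have hr1 : (k : Int) % (L : Int) < (L : Int) := Int.emod_lt_of_pos _ (by omega)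
      have hk : ((k : Int) + 1) % (L : Int) = ((k : Int) % (L : Int) + 1) % (L : Int) := by
        conv_lhs => rw [← Int.emod_add_mul_ediv (k : Int) (L : Int)]
        rw [add_right_comm, Int.add_mul_emod_self_left]
      push_cast
      rw [hk]
      split_ifs with hc
      · have hx : (k : Int) % (L : Int) = (L : Int) - 1 := by omega
        rw [hx]
        have hy : (L : Int) - 1 + 1 = (L : Int) := by ring
        rw [hy, Int.emod_self]
      · exact (Int.emod_eq_of_lt (by omega) (by omega)).symm

-- A's inner counting loop computes (n-1) % len(s)
theorem pv_count_eq_mod (s : List String) (n : Int) (hn : 1 ≤ n) (hl : 1 < s.length) :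
    (PySem.List.pyRange 0 n).foldl
        (fun j _ => if j + 1 > (s.length : Int) - 1 then 0 else j + 1) (-1)
      = PySem.Int.mod (n - 1) (s.length : Int) := by
  obtain ⟨k, hk⟩ : ∃ k : Nat, n = ((k : Int)) + 1 := ⟨(n - 1).toNat, by omega⟩
  subst hk
  have hcast : ((k : Int) + 1) = (((k + 1 : Nat) : Int)) := by push_cast; ring
  rw [hcast, PySem.List.pyRange_zero_natCast]
  rw [pv_foldl_ignore_iterate (fun j : Int => if j + 1 > (s.length : Int) - 1 then 0 else j + 1)]
  simp only [List.length_map, List.length_range]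
  rw [pv_iterate_step s.length (by omega) k]
  rw [PySem.Int.mod_eq_emod_of_pos (by omega)]
  congr 1
  push_cast
  ring

-- A's fueled loop equals B's recursion (fuel ≥ length; each round removes one element)
theorem pv_loop_eq (n : Int) (hn : 1 ≤ n) :
    ∀ (fuel : Nat) (s : List String), s.length ≤ fuel →
      findflamesLoop fuel s n = findflames_alt s n := by
  intro fuel
  induction fuel with
  | zero =>
      intro s hs
      have : s = [] := List.eq_nil_of_length_eq_zero (by omega)
      subst this
      rw [findflames_alt]
      rfl
  | succ fuel ih =>
      intro s hs
      by_cases hl : s.length > 1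
      · have hM0 : 0 ≤ PySem.Int.mod (n - 1) (s.length : Int) :=
          PySem.Int.mod_nonneg _ (by omega)
        have hM1 : PySem.Int.mod (n - 1) (s.length : Int) < (s.length : Int) :=
          PySem.Int.mod_lt _ (by omega)
        obtain ⟨r, hr, hrlt⟩ :
            ∃ r : Nat, PySem.Int.mod (n - 1) (s.length : Int) = (r : Int) ∧ r < s.length :=
          ⟨(PySem.Int.mod (n - 1) (s.length : Int)).toNat, by omega, by omega⟩
        rw [findflamesLoop, if_pos hl]
        rw [pv_count_eq_mod s n hn hl, hr]
        dsimp only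
        rw [PySem.List.pop?_natCast s r hrlt]
        dsimp only
        rw [List.eraseIdx_eq_take_drop_succ s r]
        rw [PySem.List.slice_from_natCast, PySem.List.slice_to_natCast]
        rw [List.drop_left' (by simp only [List.length_take]; omega)]
        rw [ih _ (by simp only [List.length_append, List.length_drop, List.length_take]; omega)]
        conv_rhs => rw [findflames_alt]
        rw [dif_pos hl, hr]
        dsimp only
        have hcast : ((r : Int) + 1) = (((r + 1 : Nat) : Int)) := by push_cast; ring
        rw [hcast, PySem.List.slice_from_natCast, PySem.List.slice_to_natCast]
      · rw [findflamesLoop, if_neg hl, findflames_alt, dif_neg hl]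

-- ===== VERDICT (by name: the statement is the Claim_ definition above) =====
theorem findflames_spec : Claim_equal_findflames := by
  intro s n _ hpre
  unfold Spec_findflames
  rcases hpre with hn | hl
  · exact pv_loop_eq n hn s.length s le_rfl
  · unfold findflames
    rcases s with _ | ⟨a, t⟩
    · rw [findflames_alt]
      rfl
    · rcases t with _ | ⟨b, t⟩
      · rw [findflames_alt]
        rfl
      · simp at hl
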